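-- pv_equiv track=rewrite | github.com/wwPDB/py-wwpdb_apps_workmanager | wwpdb/apps/workmanager/depict/DepictContent.py | unsubmit_group
-- ===== SOURCE A (Python) =====
-- def unsubmit_group(rows):
--     """ further process un-submitted group deposition
--     """
--     nRows = []
--     tRows = []
--     cRows = []
--     rRows = []
--     for dataD in rows:
--         if ('dep_notify' in dataD) and dataD['dep_notify']:
--             if dataD['dep_notify'].find('N') != -1:
--                 nRows.append(dataD)
--             elif dataD['dep_notify'].find('T') != -1:
--                 tRows.append(dataD)
--             else:
--                 cRows.append(dataD)
--             #
--         else: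
--             rRows.append(dataD)
--         #
--     #
--     if tRows:
--         nRows.extend(tRows)
--     #
--     if cRows:
--         nRows.extend(cRows)
--     #
--     if rRows:
--         nRows.extend(rRows)
--     #
--     return nRows
-- ===== SOURCE B (Python) =====
-- def unsubmit_group(rows):
--     """ further process un-submitted group deposition """
--     def rank(dataD):
--         v = dataD.get('dep_notify')
--         if not v:
--             return 3
--         if v.find('N') != -1:
--             return 0
--         if v.find('T') != -1:
--             return 1
--         return 2
--     return sorted(rows, key=rank)
-- ===== Notes on version B (the rewrite author's own statement) =====
-- stated objective: simpler
-- what changed: Replaces the four explicit buckets and guarded extends with a single stable sort by a 4-valued rank key; sort stability reproduces the bucket-concatenation order.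
import Mathlib
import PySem

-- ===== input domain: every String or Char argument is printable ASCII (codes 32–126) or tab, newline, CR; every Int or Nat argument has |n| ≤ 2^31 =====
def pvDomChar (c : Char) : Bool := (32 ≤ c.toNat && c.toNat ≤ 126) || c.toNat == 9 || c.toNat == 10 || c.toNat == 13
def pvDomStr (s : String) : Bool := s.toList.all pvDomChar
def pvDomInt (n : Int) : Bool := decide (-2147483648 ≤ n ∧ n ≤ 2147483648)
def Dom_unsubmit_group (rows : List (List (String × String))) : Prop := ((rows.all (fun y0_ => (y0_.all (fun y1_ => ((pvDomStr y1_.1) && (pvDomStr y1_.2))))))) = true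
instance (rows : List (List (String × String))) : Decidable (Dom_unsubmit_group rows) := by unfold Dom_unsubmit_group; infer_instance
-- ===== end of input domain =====

-- B replaces A's four explicit buckets and guarded extends with one stable sort by a 4-valued rank key (objective: simpler).

-- ===== PORT A =====
-- dataD['dep_notify'] / 'dep_notify' in dataD : first-match lookup in the dict
def usgGet (dataD : List (String × String)) : Option String :=
  PySem.Dict.get? ⟨dataD⟩ "dep_notify"

-- the body of A's for-loop: appends dataD to the matching one of the four buckets (nRows, tRows, cRows, rRows)
def usgStepA (st : List (List (String × String)) × List (List (String × String)) × List (List (String × String)) × List (List (String × String))) (dataD : List (String × String)) : List (List (String × String)) × List (List (String × String)) × List (List (String × String)) × List (List (String × String)) :=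
  match usgGet dataD with
  | some v =>
    if v ≠ "" then
      if PySem.Str.find v "N" ≠ -1 then (st.1 ++ [dataD], st.2.1, st.2.2.1, st.2.2.2)
      else if PySem.Str.find v "T" ≠ -1 then (st.1, st.2.1 ++ [dataD], st.2.2.1, st.2.2.2)
      else (st.1, st.2.1, st.2.2.1 ++ [dataD], st.2.2.2)
    else (st.1, st.2.1, st.2.2.1, st.2.2.2 ++ [dataD])
  | none => (st.1, st.2.1, st.2.2.1, st.2.2.2 ++ [dataD])

def unsubmit_group (rows : List (List (String × String))) : List (List (String × String)) :=
  let st := rows.foldl usgStepA ([], [], [], [])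
  let nRows := st.1
  let nRows := if st.2.1 ≠ [] then nRows ++ st.2.1 else nRows
  let nRows := if st.2.2.1 ≠ [] then nRows ++ st.2.2.1 else nRows
  let nRows := if st.2.2.2 ≠ [] then nRows ++ st.2.2.2 else nRows
  nRows

-- ===== PORT B =====
-- Source B's rank(dataD): 3 for a missing/empty dep_notify, 0 if it contains 'N', 1 if it contains 'T', else 2
def usgRank (dataD : List (String × String)) : Nat :=
  match PySem.Dict.get? (⟨dataD⟩ : PySem.Dict String String) "dep_notify" with
  | none => 3
  | some v =>
    if v = "" then 3
    else if PySem.Str.find v "N" ≠ -1 then 0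
    else if PySem.Str.find v "T" ≠ -1 then 1
    else 2

def unsubmit_group_alt (rows : List (List (String × String))) : List (List (String × String)) :=
  PySem.List.sorted rows usgRank

-- ===== PRECONDITION & SPEC =====
def Spec_unsubmit_group (rows : List (List (String × String))) (out : List (List (String × String))) : Prop := out = unsubmit_group_alt rows
instance (rows : List (List (String × String))) (out : List (List (String × String))) : Decidable (Spec_unsubmit_group rows out) := by unfold Spec_unsubmit_group; infer_instance

-- ===== CLAIM (what is proved, stated in full; the proofs are below) =====
def Claim_equal_unsubmit_group : Prop := ∀ (rows : List (List (String × String))), Dom_unsubmit_group rows → Spec_unsubmit_group rows (unsubmit_group rows)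

-- ===== LEMMAS AND PROOFS =====

-- the k-th bucket of rows, and the concatenation of the four buckets: the common normal form of both ports
def usgBucket (rows : List (List (String × String))) (k : Nat) : List (List (String × String)) :=
  rows.filter (fun r => usgRank r == k)

def usgCat (rows : List (List (String × String))) : List (List (String × String)) :=
  usgBucket rows 0 ++ usgBucket rows 1 ++ usgBucket rows 2 ++ usgBucket rows 3

theorem usgRank_cases (d : List (String × String)) :
    usgRank d = 0 ∨ usgRank d = 1 ∨ usgRank d = 2 ∨ usgRank d = 3 := by
  unfold usgRank
  rcases PySem.Dict.get? (⟨d⟩ : PySem.Dict String String) "dep_notify" with _ | v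
  · simp
  · dsimp only; split_ifs <;> simp

theorem mem_usgBucket {y : List (String × String)} {rows : List (List (String × String))} {k : Nat}
    (h : y ∈ usgBucket rows k) : usgRank y = k := by
  unfold usgBucket at h
  have := List.of_mem_filter h
  simpa using this

theorem insertBy_append_left {α : Type} (b : α → α → Bool) (x : α) (l1 l2 : List α)
    (h : ∀ y ∈ l1, b x y = false) :
    PySem.List.insertBy b x (l1 ++ l2) = l1 ++ PySem.List.insertBy b x l2 := by
  induction l1 with
  | nil => simp
  | cons y t ih =>
    have hy : b x y = false := h y (by simp)
    simp [PySem.List.insertBy, hy, ih (fun z hz => h z (by simp [hz]))]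

theorem insertBy_all_true {α : Type} (b : α → α → Bool) (x : α) (l : List α)
    (h : ∀ y ∈ l, b x y = true) :
    PySem.List.insertBy b x l = x :: l := by
  cases l with
  | nil => simp [PySem.List.insertBy]
  | cons y t => simp [PySem.List.insertBy, h y (by simp)]

theorem insertBy_all_false {α : Type} (b : α → α → Bool) (x : α) (l : List α)
    (h : ∀ y ∈ l, b x y = false) :
    PySem.List.insertBy b x l = l ++ [x] := by
  induction l with
  | nil => simp [PySem.List.insertBy]
  | cons y t ih =>
    simp [PySem.List.insertBy, h y (by simp), ih (fun z hz => h z (by simp [hz]))]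

theorem insertBy_mid {α : Type} (b : α → α → Bool) (x : α) (l1 l2 : List α)
    (h1 : ∀ y ∈ l1, b x y = false) (h2 : ∀ y ∈ l2, b x y = true) :
    PySem.List.insertBy b x (l1 ++ l2) = l1 ++ x :: l2 := by
  rw [insertBy_append_left b x l1 l2 h1, insertBy_all_true b x l2 h2]

theorem usgBucket_append_single (rows : List (List (String × String))) (x : List (String × String)) (k : Nat) :
    usgBucket (rows ++ [x]) k = usgBucket rows k ++ (if usgRank x = k then [x] else []) := by
  unfold usgBucket
  rw [List.filter_append]
  congr 1
  split <;> simp_all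

-- inserting x into the bucket concatenation puts it at the end of its own bucket (stability)
theorem insertBy_usgCat (p : List (List (String × String))) (x : List (String × String)) :
    PySem.List.insertBy (fun a b => decide (usgRank a < usgRank b)) x (usgCat p) = usgCat (p ++ [x]) := by
  have hlow : ∀ k, k ≤ usgRank x → ∀ y ∈ usgBucket p k,
      (fun a b => decide (usgRank a < usgRank b)) x y = false := by
    intro k hk y hy
    have := mem_usgBucket hy
    simp only [this, decide_eq_false_iff_not]
    omega
  have hhigh : ∀ k, usgRank x < k → ∀ y ∈ usgBucket p k,
      (fun a b => decide (usgRank a < usgRank b)) x y = true := by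
    intro k hk y hy
    have := mem_usgBucket hy
    simp only [this, decide_eq_true_eq]
    omega
  unfold usgCat
  rw [usgBucket_append_single, usgBucket_append_single, usgBucket_append_single, usgBucket_append_single]
  rcases usgRank_cases x with h | h | h | h
  · rw [h]
    norm_num
    exact insertBy_mid _ x _ _ (hlow 0 (by omega))
      (by intro y hy
          rcases List.mem_append.mp hy with hy | hy
          · exact hhigh 1 (by omega) y hy
          rcases List.mem_append.mp hy with hy | hy
          · exact hhigh 2 (by omega) y hy
          · exact hhigh 3 (by omega) y hy)
  · rw [h]
    norm_num
    rw [insertBy_append_left _ x _ _ (hlow 0 (by omega))]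
    rw [insertBy_mid _ x _ _ (hlow 1 (by omega))
      (by intro y hy
          rcases List.mem_append.mp hy with hy | hy
          · exact hhigh 2 (by omega) y hy
          · exact hhigh 3 (by omega) y hy)]
  · rw [h]
    norm_num
    rw [insertBy_append_left _ x _ _ (hlow 0 (by omega))]
    rw [insertBy_append_left _ x _ _ (hlow 1 (by omega))]
    rw [insertBy_mid _ x _ _ (hlow 2 (by omega)) (fun y hy => hhigh 3 (by omega) y hy)]
  · rw [h]
    norm_num
    rw [insertBy_append_left _ x _ _ (hlow 0 (by omega))]
    rw [insertBy_append_left _ x _ _ (hlow 1 (by omega))]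
    rw [insertBy_append_left _ x _ _ (hlow 2 (by omega))]
    rw [insertBy_all_false _ x _ (hlow 3 (by omega))]

theorem foldl_insertBy_usgCat (rows p : List (List (String × String))) :
    rows.foldl (fun acc x => PySem.List.insertBy (fun a b => decide (usgRank a < usgRank b)) x acc) (usgCat p)
      = usgCat (p ++ rows) := by
  induction rows generalizing p with
  | nil => simp
  | cons x rest ih =>
    rw [List.foldl_cons, insertBy_usgCat p x, ih (p ++ [x])]
    simp

theorem alt_eq_usgCat (rows : List (List (String × String))) :
    unsubmit_group_alt rows = usgCat rows := by
  unfold unsubmit_group_alt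
  rw [PySem.List.sorted_eq_foldl_insertBy]
  have := foldl_insertBy_usgCat rows []
  simpa [usgCat, usgBucket] using this

-- A's loop body, characterised through the rank key
theorem usgStepA_eq (n t c r : List (List (String × String))) (x : List (String × String)) :
    usgStepA (n, t, c, r) x =
      if usgRank x = 0 then (n ++ [x], t, c, r)
      else if usgRank x = 1 then (n, t ++ [x], c, r)
      else if usgRank x = 2 then (n, t, c ++ [x], r)
      else (n, t, c, r ++ [x]) := by
  unfold usgStepA usgGet usgRank
  rcases PySem.Dict.get? (⟨x⟩ : PySem.Dict String String) "dep_notify" with _ | v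
  · simp
  · dsimp only
    split_ifs <;> simp_all

-- A's accumulation loop fills the four buckets
theorem a_fold (rows : List (List (String × String)))
    (n t c r : List (List (String × String))) :
    rows.foldl usgStepA (n, t, c, r)
    = (n ++ usgBucket rows 0, t ++ usgBucket rows 1, c ++ usgBucket rows 2, r ++ usgBucket rows 3) := by
  induction rows generalizing n t c r with
  | nil => simp [usgBucket]
  | cons x rest ih =>
    rw [List.foldl_cons, usgStepA_eq]
    rcases usgRank_cases x with h | h | h | h <;>
      simp only [h] <;> norm_num <;>
      rw [ih] <;>
      simp [usgBucket, List.filter_cons, h]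

theorem a_eq_usgCat (rows : List (List (String × String))) :
    unsubmit_group rows = usgCat rows := by
  unfold unsubmit_group
  rw [a_fold rows [] [] [] []]
  simp only [List.nil_append]
  unfold usgCat
  by_cases h1 : usgBucket rows 1 = [] <;>
    by_cases h2 : usgBucket rows 2 = [] <;>
      by_cases h3 : usgBucket rows 3 = [] <;>
        simp [h1, h2, h3]

-- ===== VERDICT (by name: the statement is the Claim_ definition above) =====
theorem unsubmit_group_spec : Claim_equal_unsubmit_group := by
  intro rows _
  unfold Spec_unsubmit_group
  rw [alt_eq_usgCat, a_eq_usgCat]
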